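-- pv_equiv track=rewrite | github.com/aalllee/rosalind | LCSM/main.py | has_common_substring
-- ===== SOURCE A (Python) =====
-- def has_common_substring(strings, length):
--     substrings = set()
--     first = strings[0]
--
--     for i in range(len(first) - length + 1):
--         substrings.add(first[i:i+length])
--
--     for s in strings[1:]:
--         current_subs = set()
--         for i in range(len(s) - length + 1):
--             sub = s[i:i+length]
--             if sub in substrings:
--                 current_subs.add(sub)
--         substrings = current_subs
--         if not substrings:
--             return ""
--
--     return sorted(substrings)[0] if substrings else ""
-- ===== SOURCE B (Python) =====
-- def has_common_substring(strings, length):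
--     first = strings[0]
--     rest = strings[1:]
--     candidates = {first[i:i+length] for i in range(len(first) - length + 1)}
--     for c in sorted(candidates):
--         if all(c in s for s in rest):
--             return c
--     return ""
-- ===== Notes on version B (the rewrite author's own statement) =====
-- stated objective: alternative
-- what changed: A iteratively intersects per-string sets of length-L slices and finally sorts the surviving set; B generates only the first string's candidates once, iterates them in sorted order and early-returns the first candidate that is a native substring of every other string.
import Mathlib
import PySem

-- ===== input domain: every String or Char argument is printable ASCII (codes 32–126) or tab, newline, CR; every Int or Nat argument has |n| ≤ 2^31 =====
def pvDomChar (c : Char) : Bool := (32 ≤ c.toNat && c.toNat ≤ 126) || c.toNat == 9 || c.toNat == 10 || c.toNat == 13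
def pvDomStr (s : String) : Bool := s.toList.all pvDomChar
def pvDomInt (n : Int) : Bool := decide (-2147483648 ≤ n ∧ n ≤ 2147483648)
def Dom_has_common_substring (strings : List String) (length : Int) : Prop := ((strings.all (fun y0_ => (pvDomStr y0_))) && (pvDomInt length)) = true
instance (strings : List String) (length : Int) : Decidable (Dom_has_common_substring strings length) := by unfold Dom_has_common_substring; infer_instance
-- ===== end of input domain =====

-- B replaces A's iterated per-string set intersection by iterating the first string's
-- candidates in sorted order and early-returning the first one that is a substring of
-- every other string (objective: alternative; return value only, neither mutates).

-- ===== PORT A =====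
-- the set comprehension {s[i:i+length] for i in range(len(s) - length + 1)} as a list in loop order
def pySubs (s : String) (length : Int) : List String :=
  (PySem.List.pyRange 0 (PySem.Str.len s - length + 1)).map
    (fun i => PySem.Str.slice s (some i) (some (i + length)))

-- the 'for s in strings[1:]' loop with its early 'return ""' and the final return
def hcsLoop (length : Int) (substrings : PySem.Set String) : List String → String
  | [] => match PySem.List.sorted substrings (fun x => x) with
          | [] => ""               -- 'if substrings else ""'
          | c :: _ => c            -- sorted(substrings)[0]
  | s :: rest =>
      let cur := (pySubs s length).foldl
        (fun cur sub => if PySem.Set.contains substrings sub then PySem.Set.add cur sub else cur)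
        PySem.Set.empty
      if cur = [] then "" else hcsLoop length cur rest

def has_common_substring (strings : List String) (length : Int) : String :=
  let first := (PySem.List.pyGet? strings 0).getD ""   -- strings[0]; [] (IndexError) is excluded by Pre_
  let substrings := PySem.Set.ofList (pySubs first length)
  hcsLoop length substrings (PySem.List.slice strings (some 1) none)

-- ===== PORT B =====
-- 'for c in sorted(candidates): if all(c in s for s in rest): return c' / 'return ""'
def hcsFind (rest : List String) : List String → String
  | [] => ""
  | c :: cs => if rest.all (fun s => PySem.Str.isIn c s) then c else hcsFind rest cs

def has_common_substring_alt (strings : List String) (length : Int) : String :=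
  let first := (PySem.List.pyGet? strings 0).getD ""   -- strings[0]; [] (IndexError) is excluded by Pre_
  let rest := PySem.List.slice strings (some 1) none
  hcsFind rest (PySem.List.sorted (PySem.Set.ofList (pySubs first length)) (fun x => x))

-- ===== PRECONDITION & SPEC =====
-- Pre_ excludes only the empty list, on which both Pythons raise IndexError at strings[0].
def Pre_has_common_substring (strings : List String) (length : Int) : Prop := strings ≠ []
instance (strings : List String) (length : Int) : Decidable (Pre_has_common_substring strings length) := by unfold Pre_has_common_substring; infer_instance
def pvWitness_has_common_substring : List String × Int := (["abc", "bcd"], 2)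

def Spec_has_common_substring (strings : List String) (length : Int) (out : String) : Prop := out = has_common_substring_alt strings length
instance (strings : List String) (length : Int) (out : String) : Decidable (Spec_has_common_substring strings length out) := by unfold Spec_has_common_substring; infer_instance

-- ===== CLAIM (what is proved, stated in full; the proofs are below) =====
def Claim_equal_has_common_substring : Prop := ∀ (strings : List String) (length : Int), Dom_has_common_substring strings length → Pre_has_common_substring strings length → Spec_has_common_substring strings length (has_common_substring strings length)

-- ===== LEMMAS AND PROOFS =====

-- A's conditional set-building loop is Set.ofList of a filter
theorem foldl_add_if_eq_ofList_filter (xs : List String) (p : String → Bool) :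
    xs.foldl (fun c x => if p x then PySem.Set.add c x else c) PySem.Set.empty
      = PySem.Set.ofList (xs.filter p) := by
  rw [PySem.Set.ofList_eq_foldl]
  suffices h : ∀ (acc : List String),
      xs.foldl (fun c x => if p x then PySem.Set.add c x else c) acc
        = (xs.filter p).foldl PySem.Set.add acc from h _
  induction xs with
  | nil => intro acc; simp
  | cons x xs ih =>
      intro acc
      by_cases hx : p x <;> simp [hx, ih]

-- B's scan returns the first passing candidate, i.e. the head of the filtered list
theorem hcsFind_eq_headD (rest cands : List String) :
    hcsFind rest cands
      = ((cands.filter (fun c => rest.all (fun s => PySem.Str.isIn c s))).headD "") := by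
  induction cands with
  | nil => simp [hcsFind]
  | cons c cs ih =>
      simp only [hcsFind, List.filter_cons]
      by_cases h : (rest.all (fun s => PySem.Str.isIn c s)) = true
      · rw [if_pos h, if_pos h]; simp
      · rw [if_neg h, if_neg h, ih]

-- characterisation of A's loop
theorem hcsLoop_eq (L : Int) (rest : List String) (subs : List String) (hnd : subs.Nodup) :
    hcsLoop L subs rest
      = ((PySem.List.sorted
            (subs.filter (fun c => rest.all (fun s => decide (c ∈ pySubs s L)))) (fun x => x)).headD "") := by
  induction rest generalizing subs with
  | nil =>
      simp only [List.all_nil, List.filter_true]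
      cases hs : PySem.List.sorted subs (fun x => x) with
      | nil => simp [hcsLoop, hs]
      | cons m t => simp [hcsLoop, hs]
  | cons s rest ih =>
      simp only [hcsLoop, foldl_add_if_eq_ofList_filter]
      have hmem : ∀ c, c ∈ PySem.Set.ofList ((pySubs s L).filter (fun sub => PySem.Set.contains subs sub))
          ↔ c ∈ pySubs s L ∧ c ∈ subs := by
        intro c
        simp [PySem.Set.mem_ofList, List.mem_filter, PySem.Set.contains]
      by_cases hc : PySem.Set.ofList ((pySubs s L).filter (fun sub => PySem.Set.contains subs sub)) = ([] : List String)
      · rw [if_pos hc]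
        have hnil : subs.filter (fun c => (s :: rest).all (fun t => decide (c ∈ pySubs t L))) = [] := by
          rw [List.filter_eq_nil_iff]
          intro c hcs hpred
          simp only [List.all_cons, Bool.and_eq_true, decide_eq_true_eq] at hpred
          have : c ∈ PySem.Set.ofList ((pySubs s L).filter (fun sub => PySem.Set.contains subs sub)) :=
            (hmem c).2 ⟨hpred.1, hcs⟩
          rw [hc] at this
          exact absurd this (List.not_mem_nil)
        rw [hnil, (PySem.List.sorted_eq_nil_iff ([] : List String) (fun x => x) false).mpr rfl]
        rfl
      · rw [if_neg hc, ih _ (PySem.Set.nodup_ofList _)]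
        have hsort : PySem.List.sorted
              ((PySem.Set.ofList ((pySubs s L).filter (fun sub => PySem.Set.contains subs sub))).filter
                (fun c => rest.all (fun t => decide (c ∈ pySubs t L)))) (fun x => x)
            = PySem.List.sorted
              (subs.filter (fun c => (s :: rest).all (fun t => decide (c ∈ pySubs t L)))) (fun x => x) := by
          apply PySem.List.sorted_eq_sorted_of_perm _ _ _ (fun a b h => h)
          rw [List.perm_ext_iff_of_nodup (List.Nodup.filter _ (PySem.Set.nodup_ofList _)) (List.Nodup.filter _ hnd)]
          intro c
          simp only [List.mem_filter, hmem c, List.all_cons, Bool.and_eq_true, decide_eq_true_eq]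
          tauto
        rw [hsort]

-- for length ≥ 1, membership in the slice set is substring containment
theorem mem_pySubs_iff (L : Int) (hL : 1 ≤ L) (c s : String)
    (hlen : c.toList.length = L.toNat) :
    c ∈ pySubs s L ↔ PySem.Str.isIn c s = true := by
  have hlen' : PySem.Str.len s = (s.toList.length : Int) := PySem.Str.len_eq s
  rw [PySem.Str.isIn_eq, ← PySem.Chars.exists_prefix_drop_iff_isIn]
  constructor
  · rintro hm
    simp only [pySubs, List.mem_map] at hm
    obtain ⟨i, hi, hfi⟩ := hm
    rw [PySem.List.mem_pyRange_one] at hi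
    refine ⟨i.toNat, ?_⟩
    have h1 : c.toList = (s.toList.drop i.toNat).take L.toNat := by
      rw [← hfi]
      rw [PySem.Str.toList_slice, PySem.Chars.slice_eq_listSlice,
        PySem.List.slice_toNat _ hi.1 (by omega)]
      congr 1
      omega
    rw [h1]
    exact List.take_prefix _ _
  · rintro ⟨j, hj⟩
    have hjlen : L.toNat + j ≤ s.toList.length := by
      have hle := hj.length_le
      rw [List.length_drop] at hle
      omega
    simp only [pySubs, List.mem_map]
    refine ⟨(j : Int), ?_, ?_⟩
    · rw [PySem.List.mem_pyRange_one]
      omega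
    · symm
      apply String.toList_inj.mp
      rw [PySem.Str.toList_slice, PySem.Chars.slice_eq_listSlice,
        PySem.List.slice_toNat _ (by omega) (by omega)]
      have h2 : ((j : Int) + L).toNat - ((j : Int)).toNat = L.toNat := by omega
      rw [h2, Int.toNat_natCast]
      rw [List.prefix_iff_eq_take] at hj
      rw [← hlen, ← hj]

theorem length_of_mem_pySubs (L : Int) (hL : 1 ≤ L) (c s : String)
    (h : c ∈ pySubs s L) : c.toList.length = L.toNat := by
  have hlen' : PySem.Str.len s = (s.toList.length : Int) := PySem.Str.len_eq s
  simp only [pySubs, List.mem_map] at h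
  obtain ⟨i, hi, hfi⟩ := h
  rw [PySem.List.mem_pyRange_one, hlen'] at hi
  have h1 : c.toList = (s.toList.drop i.toNat).take L.toNat := by
    rw [← hfi]
    rw [PySem.Str.toList_slice, PySem.Chars.slice_eq_listSlice,
      PySem.List.slice_toNat _ hi.1 (by omega)]
    congr 1
    omega
  rw [h1, List.length_take, List.length_drop]
  omega

-- for length ≤ 0, the empty string is among the slices of every string
theorem empty_mem_pySubs (L : Int) (hL : L ≤ 0) (s : String) : ("" : String) ∈ pySubs s L := by
  have hlen' : PySem.Str.len s = (s.toList.length : Int) := PySem.Str.len_eq s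
  simp only [pySubs, List.mem_map]
  refine ⟨PySem.Str.len s - L, ?_, ?_⟩
  · rw [PySem.List.mem_pyRange_one]
    omega
  · apply String.toList_inj.mp
    rw [PySem.Str.toList_slice, PySem.Chars.slice_eq_listSlice,
      PySem.List.slice_toNat _ (by omega) (by omega)]
    have hd : s.toList.drop (PySem.Str.len s - L).toNat = [] := by
      apply List.drop_eq_nil_of_le
      omega
    rw [hd]
    simp

-- the head of a sorted string list containing "" is ""
theorem headD_sorted_of_empty_mem (l : List String) (h : ("" : String) ∈ l) :
    (PySem.List.sorted l (fun x => x)).headD "" = "" := by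
  cases hs : PySem.List.sorted l (fun x => x) with
  | nil =>
      exfalso
      have := (PySem.List.sorted_eq_nil_iff l (fun x => x) false).mp hs
      subst this
      exact absurd h (List.not_mem_nil)
  | cons m t =>
      have hle : m ≤ "" := PySem.List.key_head_sorted_le l (fun x => x) hs "" h
      have : m = "" := by
        rcases lt_or_eq_of_le hle with hlt | heq
        · exact absurd hlt (by simp)
        · exact heq
      simp [this]

-- filtering a strictly sorted set commutes with sorting
theorem sorted_filter_ofList (xs : List String) (q : String → Bool) :
    (PySem.List.sorted (PySem.Set.ofList xs) (fun x => x)).filter q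
      = PySem.List.sorted ((PySem.Set.ofList xs).filter q) (fun x => x) := by
  symm
  apply PySem.List.sorted_eq_of_perm_of_pairwise_lt
  · exact List.Perm.filter q (PySem.List.sorted_perm _ _ _)
  · exact List.Pairwise.filter q (PySem.List.sorted_ofList_pairwise_lt xs)

-- ===== VERDICT (by name: the statement is the Claim_ definition above) =====
theorem has_common_substring_spec : Claim_equal_has_common_substring := by
  intro strings L _ hpre
  unfold Spec_has_common_substring
  match strings, hpre with
  | x :: xs, _ =>
  simp only [has_common_substring, has_common_substring_alt]
  have hget : (PySem.List.pyGet? (x :: xs) (0 : Int)).getD "" = x := by simp [pysem]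
  have htail : PySem.List.slice (x :: xs) (some 1) none = xs := PySem.List.slice_from_one (x :: xs)
  rw [hget, htail, hcsLoop_eq L xs _ (PySem.Set.nodup_ofList _), hcsFind_eq_headD,
    sorted_filter_ofList]
  by_cases hL : 1 ≤ L
  · have hPQ : ∀ c ∈ PySem.Set.ofList (pySubs x L),
        (xs.all (fun s => decide (c ∈ pySubs s L))) = (xs.all (fun s => PySem.Str.isIn c s)) := by
      intro c hc
      have hclen : c.toList.length = L.toNat :=
        length_of_mem_pySubs L hL c x ((PySem.Set.mem_ofList _ _).mp hc)
      have hpt : ∀ s : String, decide (c ∈ pySubs s L) = PySem.Str.isIn c s := by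
        intro s
        cases hio : PySem.Str.isIn c s
        · simp only [decide_eq_false_iff_not]
          intro hmem'
          have := (mem_pySubs_iff L hL c s hclen).mp hmem'
          rw [hio] at this
          exact Bool.false_ne_true this
        · exact decide_eq_true ((mem_pySubs_iff L hL c s hclen).mpr hio)
      congr 1
      funext s
      exact hpt s
    rw [List.filter_congr hPQ]
  · have hL' : L ≤ 0 := by omega
    have h1 : ("" : String) ∈ (PySem.Set.ofList (pySubs x L)).filter
        (fun c => xs.all (fun s => decide (c ∈ pySubs s L))) := by
      rw [List.mem_filter]
      refine ⟨(PySem.Set.mem_ofList _ _).mpr (empty_mem_pySubs L hL' x), ?_⟩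
      simp only [List.all_eq_true, decide_eq_true_eq]
      exact fun s _ => empty_mem_pySubs L hL' s
    have h2 : ("" : String) ∈ (PySem.Set.ofList (pySubs x L)).filter
        (fun c => xs.all (fun s => PySem.Str.isIn c s)) := by
      rw [List.mem_filter]
      refine ⟨(PySem.Set.mem_ofList _ _).mpr (empty_mem_pySubs L hL' x), ?_⟩
      simp only [List.all_eq_true]
      intro s _
      rw [PySem.Str.isIn_eq]
      exact PySem.Chars.isIn_nil s.toList
    rw [headD_sorted_of_empty_mem _ h1, headD_sorted_of_empty_mem _ h2]
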